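-- pv_equiv track=rewrite | github.com/MrBrantCode/unitest_baseline | mut_generate/mist_train_taco/taco_9509/solution.py | string_filter
-- ===== SOURCE A (Python) =====
-- def string_filter(input_str: str) -> str:
--     # Initialize an empty list to store the filtered characters
--     filtered_chars = []
--
--     # Initialize an index to keep track of the current character
--     i = 0
--
--     # Iterate over the string once
--     while i < len(input_str):
--         # If the current character is 'b', skip it
--         if input_str[i] == 'b':
--             i += 1
--         # If the current character is 'a' and the next character is 'c', skip both
--         elif i < len(input_str) - 1 and input_str[i] == 'a' and input_str[i + 1] == 'c':
--             i += 2
--         # Otherwise, add the current character to the filtered list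
--         else:
--             filtered_chars.append(input_str[i])
--             i += 1
--
--     # Join the filtered characters into a string and return it
--     return ''.join(filtered_chars)
-- ===== SOURCE B (Python) =====
-- import re
--
-- def string_filter(input_str: str) -> str:
--     # One regex substitution: remove every 'ac' pair and every 'b' in a
--     # single left-to-right non-overlapping scan.
--     return re.sub(r'ac|b', '', input_str)
-- ===== Notes on version B (the rewrite author's own statement) =====
-- stated objective: idiomatic
-- what changed: Replaced the manual index loop with a single regular-expression substitution deleting every match of the pattern ac|b, the same leftmost non-overlapping removal scan done by the re engine.
import Mathlib
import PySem

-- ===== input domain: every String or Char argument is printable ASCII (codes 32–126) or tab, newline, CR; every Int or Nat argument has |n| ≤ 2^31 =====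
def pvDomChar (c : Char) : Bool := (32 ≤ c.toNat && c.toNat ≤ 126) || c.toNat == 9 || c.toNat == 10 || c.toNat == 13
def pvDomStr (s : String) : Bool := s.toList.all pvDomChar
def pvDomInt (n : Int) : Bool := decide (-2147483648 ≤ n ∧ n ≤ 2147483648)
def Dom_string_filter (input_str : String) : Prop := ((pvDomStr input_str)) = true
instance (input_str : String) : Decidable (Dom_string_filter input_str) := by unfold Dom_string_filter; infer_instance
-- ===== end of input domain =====

-- B replaces A's manual index loop by a single regex substitution re.sub(r'ac|b','',s)
-- (same leftmost non-overlapping removal scan); objective: idiomatic.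


-- ===== PORT A =====
-- A's while-loop: index i over the characters, an accumulator list appended at the back.
def pvALoop (cs : List Char) (i : Nat) (acc : List Char) : List Char :=
  if _h : i < cs.length then
    if cs[i]! = 'b' then pvALoop cs (i + 1) acc
    else if i < cs.length - 1 ∧ cs[i]! = 'a' ∧ cs[i + 1]! = 'c' then pvALoop cs (i + 2) acc
    else pvALoop cs (i + 1) (acc ++ [cs[i]!])
  else acc
termination_by cs.length - i

def string_filter (input_str : String) : String :=
  String.ofList (pvALoop input_str.toList 0 [])

-- ===== PORT B =====
-- re.sub(r'ac|b', '', s): leftmost non-overlapping scan — at each position try to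
-- match 'ac', then 'b'; on a match drop it and continue after it, else keep the
-- character. Ported exactly as that scan (exact for this fixed literal pattern).
def pvBScan : List Char → List Char
  | [] => []
  | c :: rest =>
    if c = 'a' ∧ rest.head? = some 'c' then pvBScan rest.tail
    else if c = 'b' then pvBScan rest
    else c :: pvBScan rest
termination_by cs => cs.length
decreasing_by all_goals simp

def string_filter_alt (input_str : String) : String :=
  String.ofList (pvBScan input_str.toList)

-- ===== PRECONDITION & SPEC =====
def Spec_string_filter (input_str : String) (out : String) : Prop := out = string_filter_alt input_str
instance (input_str : String) (out : String) : Decidable (Spec_string_filter input_str out) := by unfold Spec_string_filter; infer_instance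

-- ===== CLAIM (what is proved, stated in full; the proofs are below) =====
def Claim_equal_string_filter : Prop := ∀ (input_str : String), Dom_string_filter input_str → Spec_string_filter input_str (string_filter input_str)

-- ===== LEMMAS AND PROOFS =====
theorem pvALoop_eq (fuel : Nat) : ∀ (cs : List Char) (i : Nat) (acc : List Char),
    cs.length - i ≤ fuel → pvALoop cs i acc = acc ++ pvBScan (cs.drop i) := by
  induction fuel with
  | zero =>
    intro cs i acc h
    have hi : cs.length ≤ i := by omega
    rw [pvALoop]
    simp [List.drop_eq_nil_of_le hi, pvBScan, Nat.not_lt.mpr hi]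
  | succ n ih =>
    intro cs i acc h
    rw [pvALoop]
    by_cases hi : i < cs.length
    · have hdrop : cs.drop i = cs[i] :: cs.drop (i + 1) := List.drop_eq_getElem_cons hi
      have hget : cs[i]! = cs[i] := getElem!_pos cs i hi
      simp only [hi, dif_pos]
      by_cases hb : cs[i]! = 'b'
      · rw [if_pos hb, ih cs (i + 1) acc (by omega), hdrop, pvBScan]
        rw [hget] at hb
        simp [hb]
      · rw [if_neg hb]
        by_cases hac : i < cs.length - 1 ∧ cs[i]! = 'a' ∧ cs[i + 1]! = 'c'
        · have hi1 : i + 1 < cs.length := by omega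
          have hget1 : cs[i + 1]! = cs[i + 1] := getElem!_pos cs (i + 1) hi1
          have hdrop1 : cs.drop (i + 1) = cs[i + 1] :: cs.drop (i + 2) :=
            List.drop_eq_getElem_cons hi1
          have ha : cs[i] = 'a' := by rw [← hget]; exact hac.2.1
          have hc : cs[i + 1] = 'c' := by rw [← hget1]; exact hac.2.2
          rw [if_pos hac, ih cs (i + 2) acc (by omega), hdrop, pvBScan,
            if_pos (by rw [ha, hdrop1, hc]; simp)]
          rw [hdrop1, List.tail_cons]
        · rw [if_neg hac, ih cs (i + 1) (acc ++ [cs[i]!]) (by omega), hdrop, pvBScan]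
          have hnot : ¬ (cs[i] = 'a' ∧ (cs.drop (i + 1)).head? = some 'c') := by
            rintro ⟨ha, hc⟩
            by_cases hi1 : i + 1 < cs.length
            · have hdrop1 : cs.drop (i + 1) = cs[i + 1] :: cs.drop (i + 2) :=
                List.drop_eq_getElem_cons hi1
              rw [hdrop1, List.head?_cons] at hc
              have hc' : cs[i + 1] = 'c' := Option.some.inj hc
              exact hac ⟨by omega, by rw [hget]; exact ha,
                by rw [getElem!_pos cs (i + 1) hi1]; exact hc'⟩
            · rw [List.drop_eq_nil_of_le (by omega)] at hc
              simp at hc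
          rw [hget] at hb ⊢
          rw [if_neg hnot, if_neg hb]
          simp
    · simp only [hi, dif_neg, not_false_iff]
      rw [List.drop_eq_nil_of_le (by omega), pvBScan]
      simp

-- ===== VERDICT (by name: the statement is the Claim_ definition above) =====
theorem string_filter_spec : Claim_equal_string_filter := by
  intro s _
  unfold Spec_string_filter string_filter string_filter_alt
  rw [pvALoop_eq s.toList.length s.toList 0 [] (by omega)]
  simp
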